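-- pv_equiv track=rewrite | github.com/CompositRu/ros2_node_manager | server/connection/base.py | _parse_node_info
-- ===== SOURCE A (Python) =====
-- def _parse_node_info(output: str) -> dict:
--     """Parse ros2 node info output."""
--     result = {
--         "subscribers": [],
--         "publishers": [],
--         "services": [],
--         "actions": []
--     }
--
--     current_section = None
--
--     for line in output.split("\n"):
--         line = line.strip()
--
--         if "Subscribers:" in line:
--             current_section = "subscribers"
--         elif "Publishers:" in line:
--             current_section = "publishers"
--         elif "Service Servers:" in line or "Services:" in line:
--             current_section = "services"
--         elif "Action Servers:" in line:
--             current_section = "actions"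
--         elif "Action Clients:" in line:
--             current_section = None  # Skip action clients
--         elif "Service Clients:" in line:
--             current_section = None  # Skip service clients
--         elif line.startswith("/") and current_section:
--             # Extract topic/service name (before the colon if present)
--             name = line.split(":")[0].strip()
--             result[current_section].append(name)
--
--     return result
-- ===== SOURCE B (Python) =====
-- _HEADER_TAGS = (
--     ("Subscribers:", "subscribers"),
--     ("Publishers:", "publishers"),
--     ("Service Servers:", "services"),
--     ("Services:", "services"),
--     ("Action Servers:", "actions"),
--     ("Action Clients:", None),
--     ("Service Clients:", None),
-- )
--
--
-- def _header_tag(line):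
--     """(tag,) if the line is a header (tag may be None = discard section), else None."""
--     for marker, tag in _HEADER_TAGS:
--         if marker in line:
--             return (tag,)
--     return None
--
--
-- def _segments(lines):
--     """Partition the lines into contiguous groups, each tagged by its preceding header
--     (the group before the first header is tagged None)."""
--     groups = []
--     tag, body = None, []
--     for line in lines:
--         hit = _header_tag(line)
--         if hit is not None:
--             groups.append((tag, body))
--             tag, body = hit[0], []
--         else:
--             body.append(line)
--     groups.append((tag, body))
--     return groups
--
--
-- def _names(body):
--     """Topic/service names of a group: lines starting with '/', cut before the colon."""
--     return [line.split(":")[0].strip() for line in body if line.startswith("/")]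
--
--
-- def _parse_node_info(output: str) -> dict:
--     result = {
--         "subscribers": [],
--         "publishers": [],
--         "services": [],
--         "actions": []
--     }
--     lines = [line.strip() for line in output.split("\n")]
--     for tag, body in _segments(lines):
--         if tag is not None:
--             result[tag].extend(_names(body))
--     return result
-- ===== Notes on version B (the rewrite author's own statement) =====
-- stated objective: alternative
-- what changed: B replaces A's single scan that routes each line through a mutating current_section variable with a staged segmentation: first partition the stripped lines into contiguous header-tagged groups (a list of (tag, body) segments), then extract the slash-prefixed names of each tagged group and extend the result dict per segment.
import Mathlib
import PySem

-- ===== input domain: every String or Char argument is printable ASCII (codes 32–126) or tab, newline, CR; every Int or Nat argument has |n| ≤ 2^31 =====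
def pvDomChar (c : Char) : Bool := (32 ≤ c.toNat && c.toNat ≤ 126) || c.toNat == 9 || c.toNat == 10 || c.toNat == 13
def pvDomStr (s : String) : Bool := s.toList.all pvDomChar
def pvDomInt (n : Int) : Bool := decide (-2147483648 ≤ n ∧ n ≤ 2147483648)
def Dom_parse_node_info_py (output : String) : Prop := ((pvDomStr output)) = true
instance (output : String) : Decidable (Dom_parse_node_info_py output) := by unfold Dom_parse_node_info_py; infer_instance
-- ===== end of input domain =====

-- B parses by staged segmentation (partition the lines into header-tagged contiguous groups,
-- then extract each tagged group's names) instead of A's single scan routed through a mutating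
-- current_section variable; objective: alternative.

-- ===== PORT A =====
-- result[current_section].append(name): the dict's keys are the fixed four, so the in-place
-- append is the map that extends the matching entry (exact: the key is always present).
def pvAppendAt (res : List (String × List String)) (k name : String) :
    List (String × List String) :=
  res.map (fun p => if p.1 == k then (p.1, p.2 ++ [name]) else p)

def pvStepA (st : Option String × List (String × List String)) (raw : String) :
    Option String × List (String × List String) :=
  let line := PySem.Str.strip raw
  if PySem.Str.isIn "Subscribers:" line then (some "subscribers", st.2)
  else if PySem.Str.isIn "Publishers:" line then (some "publishers", st.2)
  else if PySem.Str.isIn "Service Servers:" line || PySem.Str.isIn "Services:" line then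
    (some "services", st.2)
  else if PySem.Str.isIn "Action Servers:" line then (some "actions", st.2)
  else if PySem.Str.isIn "Action Clients:" line then (none, st.2)
  else if PySem.Str.isIn "Service Clients:" line then (none, st.2)
  else if PySem.Str.startswith line "/" then
    match st.1 with
    | some sec =>
      let name := PySem.Str.strip (((PySem.Str.split? line ":").getD []).headD "")
      (st.1, pvAppendAt st.2 sec name)
    | none => st
  else st

def parse_node_info_py (output : String) : List (String × List String) :=
  (((PySem.Str.split? output "\n").getD []).foldl pvStepA
    (none, [("subscribers", []), ("publishers", []), ("services", []), ("actions", [])])).2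

-- ===== PORT B =====
def pvHeaderTags : List (String × Option String) :=
  [("Subscribers:", some "subscribers"), ("Publishers:", some "publishers"),
   ("Service Servers:", some "services"), ("Services:", some "services"),
   ("Action Servers:", some "actions"), ("Action Clients:", none), ("Service Clients:", none)]

-- _header_tag: `some t` iff the line is a header with tag t (t = none means discard section)
def pvHeaderTag (line : String) : Option (Option String) :=
  (pvHeaderTags.find? (fun item => PySem.Str.isIn item.1 line)).map (·.2)

-- _segments: partition into contiguous (tag, body) groups
def pvSegStep (st : List (Option String × List String) × Option String × List String)
    (line : String) : List (Option String × List String) × Option String × List String :=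
  match pvHeaderTag line with
  | some t => (st.1 ++ [(st.2.1, st.2.2)], t, [])
  | none => (st.1, st.2.1, st.2.2 ++ [line])

def pvSegments (lines : List String) : List (Option String × List String) :=
  let st := lines.foldl pvSegStep ([], none, [])
  st.1 ++ [(st.2.1, st.2.2)]

-- _names: slash-prefixed lines of a group, cut before the colon
def pvNames (body : List String) : List String :=
  (body.filter (fun line => PySem.Str.startswith line "/")).map
    (fun line => PySem.Str.strip (((PySem.Str.split? line ":").getD []).headD ""))

-- result[tag].extend(names)
def pvExtendAt (res : List (String × List String)) (k : String) (ns : List String) :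
    List (String × List String) :=
  res.map (fun p => if p.1 == k then (p.1, p.2 ++ ns) else p)

def pvApplySeg (res : List (String × List String)) (seg : Option String × List String) :
    List (String × List String) :=
  match seg.1 with
  | some s => pvExtendAt res s (pvNames seg.2)
  | none => res

def parse_node_info_py_alt (output : String) : List (String × List String) :=
  let lines := ((PySem.Str.split? output "\n").getD []).map PySem.Str.strip
  (pvSegments lines).foldl pvApplySeg
    [("subscribers", []), ("publishers", []), ("services", []), ("actions", [])]

-- ===== PRECONDITION & SPEC =====
def Spec_parse_node_info_py (output : String) (out : List (String × List String)) : Prop := out = parse_node_info_py_alt output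
instance (output : String) (out : List (String × List String)) : Decidable (Spec_parse_node_info_py output out) := by unfold Spec_parse_node_info_py; infer_instance

-- ===== CLAIM (what is proved, stated in full; the proofs are below) =====
def Claim_equal_parse_node_info_py : Prop := ∀ (output : String), Dom_parse_node_info_py output → Spec_parse_node_info_py output (parse_node_info_py output)

-- ===== LEMMAS AND PROOFS =====
-- result of applying a segment list to the initial dict
def pvRes (init : List (String × List String)) (segs : List (Option String × List String)) :
    List (String × List String) :=
  segs.foldl pvApplySeg init

theorem pvExtendAt_snoc (res : List (String × List String)) (k : String)
    (ns : List String) (n : String) :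
    pvExtendAt res k (ns ++ [n]) = pvAppendAt (pvExtendAt res k ns) k n := by
  simp only [pvExtendAt, pvAppendAt, List.map_map]
  apply List.map_congr_left
  intro p _
  by_cases h : p.1 = k
  · simp [h]
  · simp [h]

theorem pvNames_snoc (body : List String) (l : String)
    (h : PySem.Str.startswith l "/" = true) :
    pvNames (body ++ [l]) =
      pvNames body ++ [PySem.Str.strip (((PySem.Str.split? l ":").getD []).headD "")] := by
  have h' : PySem.Chars.startswith l.toList ['/'] = true := by simpa using h
  simp [pvNames, List.filter_append, List.filter, h', List.headD]

theorem pvNames_snoc_skip (body : List String) (l : String)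
    (h : PySem.Str.startswith l "/" = false) :
    pvNames (body ++ [l]) = pvNames body := by
  have h' : PySem.Chars.startswith l.toList ['/'] = false := by simpa using h
  simp [pvNames, List.filter_append, List.filter, h']

theorem pvStep_agree (groups : List (Option String × List String)) (cur : Option String)
    (body : List String) (init : List (String × List String)) (raw : String) :
    pvStepA (cur, pvRes init (groups ++ [(cur, body)])) raw =
      (let st := pvSegStep (groups, cur, body) (PySem.Str.strip raw)
       (st.2.1, pvRes init (st.1 ++ [(st.2.1, st.2.2)]))) := by
  simp only [pvStepA, pvSegStep, pvHeaderTag, pvHeaderTags, List.find?]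
  cases h1 : PySem.Str.isIn "Subscribers:" (PySem.Str.strip raw)
  case true => simp [pvRes, List.foldl_append, pvApplySeg, pvNames, pvExtendAt]
  all_goals cases h2 : PySem.Str.isIn "Publishers:" (PySem.Str.strip raw)
  case true => simp [pvRes, List.foldl_append, pvApplySeg, pvNames, pvExtendAt]
  all_goals cases h3 : PySem.Str.isIn "Service Servers:" (PySem.Str.strip raw)
  case true => simp [pvRes, List.foldl_append, pvApplySeg, pvNames, pvExtendAt]
  all_goals cases h4 : PySem.Str.isIn "Services:" (PySem.Str.strip raw)
  case true => simp [pvRes, List.foldl_append, pvApplySeg, pvNames, pvExtendAt]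
  all_goals cases h5 : PySem.Str.isIn "Action Servers:" (PySem.Str.strip raw)
  case true => simp [pvRes, List.foldl_append, pvApplySeg, pvNames, pvExtendAt]
  all_goals cases h6 : PySem.Str.isIn "Action Clients:" (PySem.Str.strip raw)
  case true => simp [pvRes, List.foldl_append, pvApplySeg, pvNames, pvExtendAt]
  all_goals cases h7 : PySem.Str.isIn "Service Clients:" (PySem.Str.strip raw)
  case true => simp [pvRes, List.foldl_append, pvApplySeg, pvNames, pvExtendAt]
  cases cur with
  | none =>
    cases h8 : PySem.Str.startswith (PySem.Str.strip raw) "/" <;>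
      simp [pvRes, List.foldl_append, pvApplySeg]
  | some sec =>
    cases h8 : PySem.Str.startswith (PySem.Str.strip raw) "/" with
    | false =>
      simp [pvRes, List.foldl_append, pvApplySeg,
        pvNames_snoc_skip body (PySem.Str.strip raw) h8]
    | true =>
      simp [pvRes, List.foldl_append, pvApplySeg,
        pvNames_snoc body (PySem.Str.strip raw) h8, pvExtendAt_snoc]

theorem pvFold_agree (lines : List String) (groups : List (Option String × List String))
    (cur : Option String) (body : List String) (init : List (String × List String)) :
    lines.foldl pvStepA (cur, pvRes init (groups ++ [(cur, body)])) =
      (let st := (lines.map PySem.Str.strip).foldl pvSegStep (groups, cur, body)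
       (st.2.1, pvRes init (st.1 ++ [(st.2.1, st.2.2)]))) := by
  induction lines generalizing groups cur body with
  | nil => rfl
  | cons raw rest ih =>
    rw [List.foldl_cons, pvStep_agree]
    cases h : pvSegStep (groups, cur, body) (PySem.Str.strip raw) with
    | mk g' t =>
      cases t with
      | mk c' b' =>
        simpa [h] using ih g' c' b'

-- ===== VERDICT (by name: the statement is the Claim_ definition above) =====
theorem parse_node_info_py_spec : Claim_equal_parse_node_info_py := by
  intro output _
  show parse_node_info_py output = parse_node_info_py_alt output
  unfold parse_node_info_py parse_node_info_py_alt
  have h0 : ([("subscribers", []), ("publishers", []), ("services", []), ("actions", [])] :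
      List (String × List String)) =
      pvRes [("subscribers", []), ("publishers", []), ("services", []), ("actions", [])]
        (([] : List (Option String × List String)) ++ [(none, [])]) := rfl
  rw [h0, pvFold_agree]
  rfl
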